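-- pv_equiv track=rewrite | github.com/Rijalsujal1/Python_mini_Projects | 7_madlibs_generator.py | extract_placeholders
-- ===== SOURCE A (Python) =====
-- def extract_placeholders(story):
--     words = set()
--     start_of_word = -1
--     for i, char in enumerate(story):
--         if char == "{":
--             start_of_word = i
--         elif char == "}" and start_of_word != -1:
--             word = story[start_of_word : i + 1]
--             words.add(word)
--             start_of_word = -1
--     return sorted(words)  # ensures consistent order
-- ===== SOURCE B (Python) =====
-- import re
--
-- def extract_placeholders(story):
--     return sorted(set(re.findall(r"\{[^{}]*\}", story)))
-- ===== Notes on version B (the rewrite author's own statement) =====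
-- stated objective: idiomatic
-- what changed: Replaces the manual index/state-machine character loop with a single regex findall of brace-delimited tokens plus set+sorted; the negated class [^{}]* reproduces A's reset-to-most-recent-brace behaviour.
import Mathlib
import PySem

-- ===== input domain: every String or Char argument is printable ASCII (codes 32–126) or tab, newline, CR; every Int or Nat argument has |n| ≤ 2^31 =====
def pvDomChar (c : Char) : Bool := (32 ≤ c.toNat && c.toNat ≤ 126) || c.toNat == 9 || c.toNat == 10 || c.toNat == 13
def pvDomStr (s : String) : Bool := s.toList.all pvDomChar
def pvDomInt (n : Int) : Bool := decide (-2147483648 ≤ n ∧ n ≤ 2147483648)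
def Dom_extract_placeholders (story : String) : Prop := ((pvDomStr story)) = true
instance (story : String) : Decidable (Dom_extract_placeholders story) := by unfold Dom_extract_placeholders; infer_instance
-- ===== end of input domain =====

-- B replaces A's manual index/state-machine scan by a regex-style leftmost scan for "{...}"
-- tokens followed by set + sorted (idiomatic; same result, no mutation involved).

-- ===== PORT A =====
-- the loop body of A: on '{' remember the index, on '}' with a pending '{' add the slice
def pvStepA (cs : List Char) (st : PySem.Set String × Int) (p : Int × Char) :
    PySem.Set String × Int :=
  if p.2 = '{' then (st.1, p.1)
  else if p.2 = '}' ∧ st.2 ≠ -1 then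
    (PySem.Set.add st.1
      (String.ofList (PySem.List.slice cs (some st.2) (some (p.1 + 1)))), -1)
  else st

def extract_placeholders (story : String) : List String :=
  let cs := story.toList
  let st := (PySem.List.enumerate cs).foldl (pvStepA cs) (PySem.Set.empty, -1)
  PySem.List.sorted st.1 (fun x => x) false

-- ===== PORT B =====
-- hand port of re.findall(r"\{[^{}]*\}", story): leftmost scan; at a '{' match a
-- brace-free body, succeed iff the next character is '}' (exact regex semantics:
-- on failure the engine resumes one position later, which lands on the blocking
-- character after skipping the brace-free body — pvScanB rest does the same)
def pvScanB : List Char → List String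
  | [] => []
  | c :: rest =>
    if c = '{' then
      let body := rest.takeWhile (fun d => d ≠ '{' && d ≠ '}')
      let rest' := rest.dropWhile (fun d => d ≠ '{' && d ≠ '}')
      if rest'.head? = some '}' then
        String.ofList ('{' :: body ++ ['}']) :: pvScanB rest'.tail
      else pvScanB rest
    else pvScanB rest
  termination_by cs => cs.length
  decreasing_by
    · have h1 := List.length_dropWhile_le (fun d => d ≠ '{' && d ≠ '}') rest
      have h2 := List.length_tail (l := rest.dropWhile (fun d => d ≠ '{' && d ≠ '}'))
      simp only [List.length_cons]
      omega
    · simp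
    · simp

def extract_placeholders_alt (story : String) : List String :=
  PySem.List.sorted (PySem.Set.ofList (pvScanB story.toList)) (fun x => x) false

-- ===== PRECONDITION & SPEC =====
def Spec_extract_placeholders (story : String) (out : List String) : Prop := out = extract_placeholders_alt story
instance (story : String) (out : List String) : Decidable (Spec_extract_placeholders story out) := by unfold Spec_extract_placeholders; infer_instance

-- ===== CLAIM (what is proved, stated in full; the proofs are below) =====
def Claim_equal_extract_placeholders : Prop := ∀ (story : String), Dom_extract_placeholders story → Spec_extract_placeholders story (extract_placeholders story)

-- ===== LEMMAS AND PROOFS =====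

-- reference emitter: the placeholder words in emission order, with the pending body
-- (the characters seen since the most recent unmatched '{') as explicit state
def pvEmit : List Char → Option (List Char) → List String
  | [], _ => []
  | c :: rest, p =>
    if c = '{' then pvEmit rest (some [])
    else if c = '}' then
      match p with
      | some acc => String.ofList ('{' :: acc ++ ['}']) :: pvEmit rest none
      | none => pvEmit rest none
    else
      match p with
      | some acc => pvEmit rest (some (acc ++ [c]))
      | none => pvEmit rest none

lemma pvStepA_open (cs : List Char) (st : PySem.Set String × Int) (i : Int) :
    pvStepA cs st (i, '{') = (st.1, i) := by
  simp [pvStepA]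

lemma pvStepA_close (cs : List Char) (st : PySem.Set String × Int) (i : Int) :
    pvStepA cs st (i, '}') =
      if st.2 = -1 then st
      else (PySem.Set.add st.1
        (String.ofList (PySem.List.slice cs (some st.2) (some (i + 1)))), -1) := by
  simp [pvStepA]

lemma pvStepA_other (cs : List Char) (st : PySem.Set String × Int) (i : Int) (c : Char)
    (hc : c ≠ '{') (hc2 : c ≠ '}') : pvStepA cs st (i, c) = st := by
  simp [pvStepA, hc, hc2]

lemma pvEmit_brace_free_some (body : List Char) (suf : List Char) (acc : List Char)
    (hb : ∀ c ∈ body, c ≠ '{' ∧ c ≠ '}') :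
    pvEmit (body ++ suf) (some acc) = pvEmit suf (some (acc ++ body)) := by
  induction body generalizing acc with
  | nil => simp
  | cons c t ih =>
    have hc := hb c (by simp)
    simp only [List.cons_append, pvEmit, if_neg hc.1, if_neg hc.2]
    rw [ih _ (fun d hd => hb d (by simp [hd]))]
    simp

lemma pvEmit_brace_free_none (body : List Char) (suf : List Char)
    (hb : ∀ c ∈ body, c ≠ '{' ∧ c ≠ '}') :
    pvEmit (body ++ suf) none = pvEmit suf none := by
  induction body with
  | nil => simp
  | cons c t ih =>
    have hc := hb c (by simp)
    simp only [List.cons_append, pvEmit, if_neg hc.1, if_neg hc.2]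
    exact ih (fun d hd => hb d (by simp [hd]))

-- step equations for the reference emitter and for B's scanner
lemma pvEmit_open (rest : List Char) (p : Option (List Char)) :
    pvEmit ('{' :: rest) p = pvEmit rest (some []) := by
  simp [pvEmit]

lemma pvEmit_close_some (rest : List Char) (acc : List Char) :
    pvEmit ('}' :: rest) (some acc)
      = String.ofList ('{' :: acc ++ ['}']) :: pvEmit rest none := by
  simp [pvEmit]

lemma pvEmit_close_none (rest : List Char) :
    pvEmit ('}' :: rest) none = pvEmit rest none := by
  simp [pvEmit]

lemma pvEmit_other_none (rest : List Char) (c : Char) (hc : c ≠ '{') (hc2 : c ≠ '}') :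
    pvEmit (c :: rest) none = pvEmit rest none := by
  simp [pvEmit, hc, hc2]

lemma pvScanB_nil : pvScanB [] = [] := by
  rw [pvScanB]

lemma pvScanB_open (rest : List Char) :
    pvScanB ('{' :: rest) =
      if (rest.dropWhile (fun d => d ≠ '{' && d ≠ '}')).head? = some '}' then
        String.ofList ('{' :: rest.takeWhile (fun d => d ≠ '{' && d ≠ '}') ++ ['}'])
          :: pvScanB (rest.dropWhile (fun d => d ≠ '{' && d ≠ '}')).tail
      else pvScanB rest := by
  rw [pvScanB]
  simp only [ite_true]

lemma pvScanB_not_open (rest : List Char) (c : Char) (hc : c ≠ '{') :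
    pvScanB (c :: rest) = pvScanB rest := by
  rw [pvScanB]
  simp [hc]

-- B's regex scan emits exactly the reference sequence
lemma pvScanB_eq_pvEmit_aux : ∀ (n : Nat) (cs : List Char), cs.length ≤ n →
    pvScanB cs = pvEmit cs none := by
  intro n
  induction n with
  | zero =>
    intro cs h
    have : cs = [] := List.eq_nil_of_length_eq_zero (Nat.le_zero.mp h)
    subst this
    rw [pvScanB_nil]
    rfl
  | succ n ih =>
    intro cs h
    match cs with
    | [] => rw [pvScanB_nil]; rfl
    | c :: rest =>
      have hlen : rest.length ≤ n := by simp at h; omega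
      have hb : ∀ d ∈ rest.takeWhile (fun d => d ≠ '{' && d ≠ '}'), d ≠ '{' ∧ d ≠ '}' := by
        intro d hd
        have := List.mem_takeWhile_imp hd
        simpa using this
      have hsplit := List.takeWhile_append_dropWhile
        (p := fun d => d ≠ '{' && d ≠ '}') (l := rest)
      by_cases hc : c = '{'
      · subst hc
        rw [pvScanB_open, pvEmit_open]
        have hEmS : pvEmit rest (some []) =
            pvEmit (rest.dropWhile (fun d => d ≠ '{' && d ≠ '}'))
              (some (rest.takeWhile (fun d => d ≠ '{' && d ≠ '}'))) := by
          conv_lhs => rw [← hsplit]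
          rw [pvEmit_brace_free_some _ _ [] hb]
          simp
        rw [hEmS]
        cases hdrop : rest.dropWhile (fun d => d ≠ '{' && d ≠ '}') with
        | nil =>
          rw [hdrop] at hsplit
          rw [if_neg (by simp)]
          rw [ih rest hlen]
          conv_lhs => rw [← hsplit]
          rw [pvEmit_brace_free_none _ _ hb]
          rfl
        | cons d t =>
          have hd : ¬ (d ≠ '{' && d ≠ '}') = true := by
            have := List.head?_dropWhile_not (p := fun d => d ≠ '{' && d ≠ '}') (l := rest)
            rw [hdrop] at this
            simpa using this
          rw [hdrop] at hsplit
          by_cases hdd : d = '}'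
          · subst hdd
            rw [if_pos (by simp), List.tail_cons, pvEmit_close_some]
            rw [ih t (by have := congrArg List.length hsplit; simp at this; omega)]
          · have hdd2 : d = '{' := by
              by_cases h1 : d = '{'
              · exact h1
              · exact absurd ((show ¬d = '{' → d = '}' by simpa using hd) h1) hdd
            subst hdd2
            rw [if_neg (by simp), pvEmit_open]
            rw [ih rest hlen]
            conv_lhs => rw [← hsplit]
            rw [pvEmit_brace_free_none _ _ hb, pvEmit_open]
      · rw [pvScanB_not_open rest c hc, ih rest hlen]
        by_cases hc2 : c = '}'
        · subst hc2
          rw [pvEmit_close_none]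
        · rw [pvEmit_other_none rest c hc hc2]

lemma pvScanB_eq_pvEmit (cs : List Char) : pvScanB cs = pvEmit cs none :=
  pvScanB_eq_pvEmit_aux cs.length cs le_rfl

-- invariant-carrying characterisation of A's loop
lemma pvLoopA (cs : List Char) :
    ∀ (suf : List Char) (k : Nat) (w : PySem.Set String) (start : Int)
      (p : Option (List Char)),
      cs.drop k = suf →
      ((p = none ∧ start = -1) ∨
        ∃ (j : Nat) (acc : List Char), p = some acc ∧ start = (j : Int) ∧
          j + acc.length + 1 = k ∧ cs.drop j = '{' :: (acc ++ suf)) →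
      ((PySem.List.enumerate suf (k : Int)).foldl (pvStepA cs) (w, start)).1
        = (pvEmit suf p).foldl PySem.Set.add w := by
  intro suf
  induction suf with
  | nil => intro k w start p _ _; simp [PySem.List.enumerate_nil, pvEmit]
  | cons c rest ih =>
    intro k w start p hdrop hinv
    have hdrop' : cs.drop (k + 1) = rest := by
      rw [← List.drop_drop, hdrop]; simp
    rw [PySem.List.enumerate_cons, List.foldl_cons]
    by_cases hc : c = '{'
    · subst hc
      rw [pvStepA_open]
      have := ih (k + 1) w (k : Int) (some []) hdrop'
        (Or.inr ⟨k, [], rfl, rfl, by simp, by rw [hdrop]; simp⟩)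
      push_cast at this ⊢
      rw [this]
      simp [pvEmit]
    · by_cases hc2 : c = '}'
      · subst hc2
        rw [pvStepA_close]
        rcases hinv with ⟨hp, hs⟩ | ⟨j, acc, hp, hs, hk, hj⟩
        · subst hp hs
          rw [if_pos rfl]
          have := ih (k + 1) w (-1) none hdrop' (Or.inl ⟨rfl, rfl⟩)
          push_cast at this ⊢
          rw [this]
          simp [pvEmit, hc]
        · subst hp hs
          rw [if_neg (by omega)]
          have hslice : PySem.List.slice cs (some ((j : Nat) : Int)) (some ((k : Int) + 1))
              = '{' :: acc ++ ['}'] := by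
            rw [show ((k : Int) + 1) = (((k + 1 : Nat)) : Int) by push_cast; ring,
              PySem.List.slice_natCast, hj]
            rw [show k + 1 - j = ('{' :: acc).length + 1 by simp; omega]
            rw [show ('{' :: (acc ++ '}' :: rest)) = ('{' :: acc) ++ '}' :: rest by simp]
            rw [List.take_append]
            simp
          rw [hslice]
          have := ih (k + 1)
            (PySem.Set.add w (String.ofList ('{' :: acc ++ ['}']))) (-1) none hdrop'
            (Or.inl ⟨rfl, rfl⟩)
          push_cast at this ⊢
          rw [this]
          simp [pvEmit, hc]
      · rw [pvStepA_other cs _ _ c hc hc2]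
        rcases hinv with ⟨hp, hs⟩ | ⟨j, acc, hp, hs, hk, hj⟩
        · subst hp hs
          have := ih (k + 1) w (-1) none hdrop' (Or.inl ⟨rfl, rfl⟩)
          push_cast at this ⊢
          rw [this]
          simp [pvEmit, hc, hc2]
        · subst hp hs
          have := ih (k + 1) w ((j : Nat) : Int) (some (acc ++ [c])) hdrop'
            (Or.inr ⟨j, acc ++ [c], rfl, rfl, by simp; omega, by rw [hj]; simp⟩)
          push_cast at this ⊢
          rw [this]
          simp [pvEmit, hc, hc2]

-- ===== VERDICT (by name: the statement is the Claim_ definition above) =====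
theorem extract_placeholders_spec : Claim_equal_extract_placeholders := by
  intro story _
  unfold Spec_extract_placeholders extract_placeholders extract_placeholders_alt
  show PySem.List.sorted
      ((PySem.List.enumerate story.toList).foldl (pvStepA story.toList)
        (PySem.Set.empty, -1)).1 (fun x => x) false
    = PySem.List.sorted (PySem.Set.ofList (pvScanB story.toList)) (fun x => x) false
  have h := pvLoopA story.toList story.toList 0 PySem.Set.empty (-1) none (by simp)
    (Or.inl ⟨rfl, rfl⟩)
  simp only [Nat.cast_zero] at h
  rw [h, pvScanB_eq_pvEmit, PySem.Set.ofList_eq_foldl]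
  rfl
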